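-- pv_equiv track=rewrite | github.com/frostburn/hewmp | notation.py | reverse_inflections
-- ===== SOURCE A (Python) =====
-- def rindex(lst, value):
--     lst = list(lst)
--     return len(lst) - lst[::-1].index(value) - 1
--
-- def reverse_inflections(inflections):
--     result = []
--     for arrow, comma in inflections.items():
--         index = 0
--         if 1 in comma:
--             index = rindex(comma, 1)
--         if -1 in comma:
--             index = max(index, rindex(comma, -1))
--         result.append((index, arrow, comma))
--     return result
-- ===== SOURCE B (Python) =====
-- def reverse_inflections(inflections):
--     result = []
--     for arrow, comma in inflections.items():
--         best = 0
--         for i, val in enumerate(comma):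
--             if val == 1 or val == -1:
--                 best = i
--         result.append((best, arrow, comma))
--     return result
-- ===== Notes on version B (the rewrite author's own statement) =====
-- stated objective: simpler
-- what changed: Replaces the two membership tests plus two reversed-copy rindex scans combined with max by a single forward pass per comma that records the last index holding 1 or -1.
import Mathlib
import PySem

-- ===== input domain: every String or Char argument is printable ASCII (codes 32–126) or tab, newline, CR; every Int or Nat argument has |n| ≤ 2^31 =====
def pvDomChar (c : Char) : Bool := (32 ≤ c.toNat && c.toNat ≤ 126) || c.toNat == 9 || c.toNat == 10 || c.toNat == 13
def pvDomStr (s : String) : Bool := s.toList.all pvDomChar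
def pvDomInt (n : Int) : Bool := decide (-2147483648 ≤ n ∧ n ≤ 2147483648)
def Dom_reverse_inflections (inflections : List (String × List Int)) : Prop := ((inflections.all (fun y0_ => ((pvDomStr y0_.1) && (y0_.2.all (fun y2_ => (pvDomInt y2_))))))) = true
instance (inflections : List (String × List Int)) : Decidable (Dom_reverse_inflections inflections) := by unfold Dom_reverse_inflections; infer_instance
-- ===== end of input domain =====

-- B replaces A's two membership tests + two reversed-copy rindex scans + max combine with one
-- forward pass per comma that records the last index holding 1 or -1 (objective: simpler).

-- ===== PORT A =====
-- rindex(lst, value): len(lst) - lst[::-1].index(value) - 1.  `.index` raises when the value is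
-- absent; every call site guards with membership, so the `getD 0` default is never reached.
def rindexA (lst : List Int) (value : Int) : Int :=
  let rev := (PySem.List.slice? lst none none (-1)).getD []
  (lst.length : Int) - (((PySem.List.index? rev value).getD 0 : Nat) : Int) - 1

def reverse_inflections (inflections : List (String × List Int)) : List (Int × String × List Int) :=
  inflections.foldl (fun result p =>
    let arrow := p.1
    let comma := p.2
    let index : Int := 0
    let index := if comma.contains (1 : Int) then rindexA comma 1 else index
    let index := if comma.contains (-1 : Int) then max index (rindexA comma (-1)) else index
    result ++ [(index, arrow, comma)]) []

-- ===== PORT B =====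
-- state = (next index i, best index so far); best starts at 0
def bestStep (st : Int × Int) (v : Int) : Int × Int :=
  (st.1 + 1, if v == 1 || v == -1 then st.1 else st.2)

def reverse_inflections_alt (inflections : List (String × List Int)) : List (Int × String × List Int) :=
  inflections.map (fun p => ((p.2.foldl bestStep (0, 0)).2, p.1, p.2))

-- ===== PRECONDITION & SPEC =====
def Spec_reverse_inflections (inflections : List (String × List Int)) (out : List (Int × String × List Int)) : Prop := out = reverse_inflections_alt inflections
instance (inflections : List (String × List Int)) (out : List (Int × String × List Int)) : Decidable (Spec_reverse_inflections inflections out) := by unfold Spec_reverse_inflections; infer_instance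

-- ===== CLAIM (what is proved, stated in full; the proofs are below) =====
def Claim_equal_reverse_inflections : Prop := ∀ (inflections : List (String × List Int)), Dom_reverse_inflections inflections → Spec_reverse_inflections inflections (reverse_inflections inflections)

-- ===== LEMMAS AND PROOFS =====

-- A's per-comma index computation, named for the proofs
def aIdx (xs : List Int) : Int :=
  let index : Int := 0
  let index := if xs.contains (1 : Int) then rindexA xs 1 else index
  if xs.contains (-1 : Int) then max index (rindexA xs (-1)) else index

lemma rindexA_eq (lst : List Int) (value : Int) :
    rindexA lst value =
      (lst.length : Int) - (((PySem.List.index? lst.reverse value).getD 0 : Nat) : Int) - 1 := by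
  simp [rindexA, PySem.List.slice?_none_none_neg_one]

lemma rindexA_snoc_self (xs : List Int) (v : Int) :
    rindexA (xs ++ [v]) v = (xs.length : Int) := by
  rw [rindexA_eq, List.reverse_append, List.reverse_singleton, List.singleton_append,
    PySem.List.index?_cons_self]
  simp

lemma rindexA_snoc_ne (xs : List Int) (x v : Int) (hne : x ≠ v) (hm : v ∈ xs) :
    rindexA (xs ++ [x]) v = rindexA xs v := by
  have hsome : (PySem.List.index? xs.reverse v).isSome := by
    rw [PySem.List.index?_isSome_iff]; simpa using hm
  obtain ⟨i, hi⟩ := Option.isSome_iff_exists.mp hsome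
  rw [rindexA_eq, rindexA_eq, List.reverse_append, List.reverse_singleton,
    List.singleton_append, PySem.List.index?_cons_of_ne _ hne, hi]
  simp

lemma rindexA_bounds (xs : List Int) (v : Int) (hm : v ∈ xs) :
    0 ≤ rindexA xs v ∧ rindexA xs v < (xs.length : Int) := by
  have hsome : (PySem.List.index? xs.reverse v).isSome := by
    rw [PySem.List.index?_isSome_iff]; simpa using hm
  obtain ⟨i, hi⟩ := Option.isSome_iff_exists.mp hsome
  obtain ⟨hk, -, -⟩ := PySem.List.getElem_of_index?_eq_some hi
  rw [rindexA_eq, hi]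
  simp only [Option.getD_some]
  simp only [List.length_reverse] at hk
  omega

lemma bestStep_fst (xs : List Int) (i b : Int) :
    (xs.foldl bestStep (i, b)).1 = i + xs.length := by
  induction xs generalizing i b with
  | nil => simp
  | cons x xs ih => simp [bestStep, ih]; ring

lemma aIdx_eq_best (xs : List Int) : aIdx xs = (xs.foldl bestStep (0, 0)).2 := by
  induction xs using List.reverseRecOn with
  | nil => simp [aIdx]
  | append_singleton xs x ih =>
    rw [List.foldl_append, List.foldl_cons, List.foldl_nil]
    by_cases h1 : x = 1
    · subst h1
      have hr1 : rindexA (xs ++ [1]) 1 = (xs.length : Int) := rindexA_snoc_self xs 1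
      simp only [aIdx, bestStep, List.contains_append]
      by_cases hm : (-1 : Int) ∈ xs
      · have hb := rindexA_bounds xs (-1) hm
        have hr2 : rindexA (xs ++ [1]) (-1) = rindexA xs (-1) :=
          rindexA_snoc_ne xs 1 (-1) (by norm_num) hm
        simp [hm, hr1, hr2, bestStep_fst, List.contains_eq_mem]
        omega
      · simp [hm, hr1, bestStep_fst, List.contains_eq_mem]
    · by_cases h2 : x = -1
      · subst h2
        have hr2 : rindexA (xs ++ [-1]) (-1) = (xs.length : Int) := rindexA_snoc_self xs (-1)
        simp only [aIdx, bestStep, List.contains_append]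
        by_cases hm : (1 : Int) ∈ xs
        · have hb := rindexA_bounds xs 1 hm
          have hr1 : rindexA (xs ++ [-1]) 1 = rindexA xs 1 :=
            rindexA_snoc_ne xs (-1) 1 (by norm_num) hm
          simp [hm, hr1, hr2, bestStep_fst, List.contains_eq_mem]
          omega
        · simp [hm, hr2, bestStep_fst, List.contains_eq_mem]
      · have h1' : ¬ (1 : Int) = x := fun h => h1 h.symm
        have h2' : ¬ (-1 : Int) = x := fun h => h2 h.symm
        have hpb : (x == (1 : Int) || x == (-1 : Int)) = false := by
          simp [h1, h2]
        have hbs : (bestStep (xs.foldl bestStep (0, 0)) x).2 = (xs.foldl bestStep (0, 0)).2 := by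
          simp [bestStep, hpb]
        rw [hbs, ← ih]
        by_cases hm1 : (1 : Int) ∈ xs <;> by_cases hm2 : (-1 : Int) ∈ xs
        · simp [aIdx, hm1, hm2, rindexA_snoc_ne xs x 1 h1 hm1,
            rindexA_snoc_ne xs x (-1) h2 hm2]
        · simp [aIdx, hm1, hm2, h1', h2', rindexA_snoc_ne xs x 1 h1 hm1]
        · simp [aIdx, hm1, hm2, h1', h2', rindexA_snoc_ne xs x (-1) h2 hm2]
        · simp [aIdx, hm1, hm2, h1', h2']

lemma foldA_eq_map (l : List (String × List Int)) (acc : List (Int × String × List Int)) :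
    l.foldl (fun result p => result ++ [(aIdx p.2, p.1, p.2)]) acc
      = acc ++ l.map (fun p => (aIdx p.2, p.1, p.2)) := by
  induction l generalizing acc with
  | nil => simp
  | cons x l ih => simp [ih]

-- ===== VERDICT (by name: the statement is the Claim_ definition above) =====
theorem reverse_inflections_spec : Claim_equal_reverse_inflections := by
  intro inflections _
  show reverse_inflections inflections = reverse_inflections_alt inflections
  show inflections.foldl (fun result p => result ++ [(aIdx p.2, p.1, p.2)]) []
      = reverse_inflections_alt inflections
  rw [foldA_eq_map, List.nil_append]
  exact List.map_congr_left (fun p _ => by rw [aIdx_eq_best p.2])
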